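-- pv_equiv track=rewrite | github.com/mohamm-alsaid/databased_challenge | Take_Home/DataBased_Python_Assessment.py | getPairsOfShoes
-- ===== SOURCE A (Python) =====
-- def getPairsOfShoes(listOfShoes):
--     # using a hashmap, one can get the number of total occurrances of colors
--     colors = {}
--     for c in listOfShoes:
--         if not c in colors:
--             colors[c] = 1
--         else:
--             colors[c]+=1
--
--     # calculate the total number of pairs (i.e. creater than 2) occurred & return that
--     return sum(map(lambda x: x//2,colors.values()))
-- ===== SOURCE B (Python) =====
-- def getPairsOfShoes(listOfShoes):
--     # sort-then-run-scan: count consecutive runs of equal colors, add run//2 each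
--     s = sorted(listOfShoes)
--     if not s:
--         return 0
--     cur = s[0]
--     run = 1
--     total = 0
--     for c in s[1:]:
--         if c == cur:
--             run += 1
--         else:
--             total += run // 2
--             cur = c
--             run = 1
--     return total + run // 2
-- ===== Notes on version B (the rewrite author's own statement) =====
-- stated objective: alternative
-- what changed: Replaces the hashmap color-count accumulation with sorting a copy and one linear pass over the sorted list that sums run_length//2 for each maximal run of equal elements, keeping only the current element and run length instead of a dictionary.
import Mathlib
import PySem

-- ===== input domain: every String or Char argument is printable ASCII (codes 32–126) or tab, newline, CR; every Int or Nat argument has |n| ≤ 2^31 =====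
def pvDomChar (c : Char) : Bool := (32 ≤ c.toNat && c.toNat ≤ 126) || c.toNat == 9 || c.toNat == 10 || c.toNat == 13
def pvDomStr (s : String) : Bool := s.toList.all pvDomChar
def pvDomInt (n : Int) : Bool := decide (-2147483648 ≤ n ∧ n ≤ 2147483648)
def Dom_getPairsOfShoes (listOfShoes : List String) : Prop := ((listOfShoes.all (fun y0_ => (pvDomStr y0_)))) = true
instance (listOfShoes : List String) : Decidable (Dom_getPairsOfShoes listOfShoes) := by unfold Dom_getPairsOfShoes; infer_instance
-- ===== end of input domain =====

-- B replaces A's hashmap color-counting with sort-then-run-scan (different algorithm, similar cost).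

-- ===== PORT A =====
def getPairsOfShoes (listOfShoes : List String) : Int :=
  let colors := listOfShoes.foldl
    (fun d c =>
      if d.contains c = false then d.insert c (1 : Int)
      else d.insert c (d.getD c 0 + 1))
    PySem.Dict.empty
  (colors.values.map (fun x => PySem.Int.floordiv x 2)).sum

-- ===== PORT B =====
-- the for-loop of Source B over the tail of the sorted list, state (cur, run, total)
def pvRunScan : List String → String → Int → Int → Int
  | [], _, run, total => total + PySem.Int.floordiv run 2
  | c :: rest, cur, run, total =>
    if c = cur then pvRunScan rest cur (run + 1) total
    else pvRunScan rest c 1 (total + PySem.Int.floordiv run 2)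

def getPairsOfShoes_alt (listOfShoes : List String) : Int :=
  match PySem.List.sorted listOfShoes (fun x => x) false with
  | [] => 0
  | c :: rest => pvRunScan rest c 1 0

-- ===== PRECONDITION & SPEC =====
def Spec_getPairsOfShoes (listOfShoes : List String) (out : Int) : Prop := out = getPairsOfShoes_alt listOfShoes
instance (listOfShoes : List String) (out : Int) : Decidable (Spec_getPairsOfShoes listOfShoes out) := by unfold Spec_getPairsOfShoes; infer_instance

-- ===== CLAIM (what is proved, stated in full; the proofs are below) =====
def Claim_equal_getPairsOfShoes : Prop := ∀ (listOfShoes : List String), Dom_getPairsOfShoes listOfShoes → Spec_getPairsOfShoes listOfShoes (getPairsOfShoes listOfShoes)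

-- ===== LEMMAS AND PROOFS =====

-- the common specification: sum over the distinct colors of count // 2
def pvSpecSum (s : List String) : Int :=
  ((PySem.List.dedup s).map (fun k => PySem.Int.floordiv ((s.count k : Int)) 2)).sum

-- B's top-level scan on an arbitrary list (proof-side view of getPairsOfShoes_alt's match)
def pvScanTop : List String → Int
  | [] => 0
  | c :: rest => pvRunScan rest c 1 0

theorem pvRunScan_tot (l : List String) : ∀ cur run t,
    pvRunScan l cur run t = t + pvRunScan l cur run 0 := by
  induction l with
  | nil => intro cur run t; simp [pvRunScan]
  | cons c rest ih =>
    intro cur run t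
    by_cases h : c = cur <;> simp [pvRunScan, h]
    · exact ih cur (run + 1) t
    · rw [ih c 1 (t + _)]; conv_rhs => rw [ih c 1 _]
      ring
theorem sum_over_nodup (K K' : List String) (f : String → Int)
    (h1 : K.Nodup) (h2 : K'.Nodup) (hm : ∀ x, x ∈ K ↔ x ∈ K') :
    (K.map f).sum = (K'.map f).sum := by
  have hp : K.Perm K' := (List.perm_ext_iff_of_nodup h1 h2).mpr hm
  exact (hp.map f).sum_eq

theorem pvRunScan_const (t : List String) : ∀ l cur run tot,
    (∀ x ∈ t, x = cur) →
    pvRunScan (t ++ l) cur run tot = pvRunScan l cur (run + t.length) tot := by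
  induction t with
  | nil => intro l cur run tot _; simp
  | cons a t ih =>
    intro l cur run tot h
    have ha : a = cur := h a (by simp)
    simp only [List.cons_append, pvRunScan, if_pos ha]
    rw [ih l cur (run + 1) tot (fun x hx => h x (by simp [hx]))]
    congr 1
    simp only [List.length_cons]
    push_cast; ring

theorem pvScan_eq_spec : ∀ n (s : List String), s.length ≤ n →
    s.Pairwise (· ≤ ·) → pvScanTop s = pvSpecSum s := by
  intro n
  induction n with
  | zero =>
    intro s hlen _
    have hs : s = [] := List.eq_nil_of_length_eq_zero (by omega)
    subst hs; rfl
  | succ n ih =>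
    intro s hlen hpw
    cases s with
    | nil => rfl
    | cons c rest =>
      have hc1 : ∀ y ∈ rest, c ≤ y := (List.pairwise_cons.mp hpw).1
      have hrpw : rest.Pairwise (· ≤ ·) := (List.pairwise_cons.mp hpw).2
      have hrest : rest.takeWhile (· == c) ++ rest.dropWhile (· == c) = rest :=
        List.takeWhile_append_dropWhile
      set t := rest.takeWhile (· == c) with htdef
      set d := rest.dropWhile (· == c) with hddef
      have ht : ∀ x ∈ t, x = c := fun x hx => by
        have := List.mem_takeWhile_imp hx; simpa using this
      have hdpw : d.Pairwise (· ≤ ·) := hrpw.sublist (List.dropWhile_sublist _)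
      have hdne : ∀ x ∈ d, x ≠ c := by
        intro x hx
        cases hdd : d with
        | nil => rw [hdd] at hx; simp at hx
        | cons e d' =>
          have he : (e == c) = false := by
            have h0 := List.head?_dropWhile_not (· == c) rest
            rw [← hddef, hdd] at h0; simpa using h0
          have hec : c < e := lt_of_le_of_ne (hc1 e (by rw [← hrest, hdd]; simp))
            (Ne.symm (by simpa using he))
          have hex : e ≤ x := by
            rw [hdd] at hx
            rcases List.mem_cons.mp hx with h | h
            · exact le_of_eq h.symm
            · rw [hdd] at hdpw
              exact (List.pairwise_cons.mp hdpw).1 x h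
          exact (lt_of_lt_of_le hec hex).ne'
      have htc : t.count c = t.length :=
        List.count_eq_length.mpr (fun b hb => (ht b hb).symm)
      have hdc : d.count c = 0 := List.count_eq_zero.mpr (fun h => hdne c h rfl)
      have hlen' : d.length ≤ n := by
        have h1 := List.length_dropWhile_le (· == c) rest
        rw [← hddef] at h1
        simp only [List.length_cons] at hlen
        omega
      -- scan side
      have hscan : pvScanTop (c :: rest) =
          PySem.Int.floordiv (1 + (t.length : Int)) 2 + pvScanTop d := by
        show pvRunScan rest c 1 0 = _
        rw [← hrest, pvRunScan_const t d c 1 0 ht]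
        cases hdd : d with
        | nil => simp [pvRunScan, pvScanTop]
        | cons e d' =>
          have he_ne : e ≠ c := hdne e (by rw [hdd]; simp)
          simp only [pvRunScan, if_neg he_ne]
          rw [pvRunScan_tot]
          simp [pvScanTop]
      -- spec side
      have hmemd : ∀ x ∈ d, x ∈ rest := fun x hx => by rw [← hrest]; simp [hx]
      have hcnt : ∀ k ∈ PySem.List.dedup d, ((c :: rest).count k : Int) = (d.count k : Int) := by
        intro k hk
        have hkd : k ∈ d := (PySem.List.mem_dedup _ _).mp hk
        have hkc : k ≠ c := hdne k hkd
        have htk : t.count k = 0 :=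
          List.count_eq_zero.mpr (fun h => hkc (ht k h))
        rw [← hrest]
        simp [List.count_append, htk, Ne.symm hkc]
      have hspec : pvSpecSum (c :: rest) =
          PySem.Int.floordiv (1 + (t.length : Int)) 2 + pvSpecSum d := by
        unfold pvSpecSum
        rw [sum_over_nodup (PySem.List.dedup (c :: rest)) (c :: PySem.List.dedup d)
          (fun k => PySem.Int.floordiv (((c :: rest).count k : Int)) 2)
          (PySem.List.nodup_dedup _)
          (List.nodup_cons.mpr ⟨fun h => hdne c ((PySem.List.mem_dedup _ _).mp h) rfl,
            PySem.List.nodup_dedup _⟩)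
          (by
            intro x
            simp only [PySem.List.mem_dedup, List.mem_cons]
            constructor
            · rintro (h | h)
              · exact Or.inl h
              · rw [← hrest] at h
                rcases List.mem_append.mp h with h | h
                · exact Or.inl (ht x h)
                · exact Or.inr h
            · rintro (h | h)
              · exact Or.inl h
              · exact Or.inr (hmemd x h))]
        simp only [List.map_cons, List.sum_cons]
        congr 1
        · congr 1
          have : (c :: rest).count c = rest.count c + 1 := by
            simp
          rw [this, ← hrest, List.count_append, htc, hdc]
          push_cast; ring
        · exact congrArg List.sum (List.map_congr_left (fun k hk => by rw [hcnt k hk]))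
      rw [hscan, hspec, ih d hlen' hdpw]

theorem portA_eq_spec (xs : List String) : getPairsOfShoes xs = pvSpecSum xs := by
  unfold getPairsOfShoes pvSpecSum
  have hstep : (fun (d : PySem.Dict String Int) c =>
      if d.contains c = false then d.insert c (1 : Int)
      else d.insert c (d.getD c 0 + 1)) = (fun d x => d.insert x (d.getD x 0 + 1)) := by
    funext d c
    by_cases hc : d.contains c = false
    · simp [hc, PySem.Dict.getD_of_not_contains d 0 hc]
    · simp [hc]
  rw [hstep, PySem.Dict.foldl_insert_getD_add_one_eq_counter]
  simp [PySem.Dict.values, PySem.Dict.items_counter, List.map_map, Function.comp_def,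
    PySem.List.dedup_eq_ofList]

theorem spec_perm (xs : List String) :
    pvSpecSum (PySem.List.sorted xs (fun x => x) false) = pvSpecSum xs := by
  have hp : (PySem.List.sorted xs (fun x => x) false).Perm xs := PySem.List.sorted_perm xs _ _
  unfold pvSpecSum
  have hcnt : ∀ k, (PySem.List.sorted xs (fun x => x) false).count k = xs.count k :=
    fun k => hp.count_eq k
  simp only [hcnt]
  exact sum_over_nodup _ _ _ (PySem.List.nodup_dedup _) (PySem.List.nodup_dedup _)
    (fun x => by simp [hp.mem_iff])

theorem portB_eq_scan (xs : List String) :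
    getPairsOfShoes_alt xs = pvScanTop (PySem.List.sorted xs (fun x => x) false) := by
  cases h : PySem.List.sorted xs (fun x => x) false <;>
    simp [getPairsOfShoes_alt, pvScanTop, h]

-- ===== VERDICT (by name: the statement is the Claim_ definition above) =====
theorem getPairsOfShoes_spec : Claim_equal_getPairsOfShoes := by
  intro xs _
  unfold Spec_getPairsOfShoes
  rw [portA_eq_spec, portB_eq_scan,
    pvScan_eq_spec (PySem.List.sorted xs (fun x => x) false).length _ le_rfl
      (by simpa using PySem.List.sorted_pairwise xs (fun x => x)),
    spec_perm]
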